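-- pv_equiv track=rewrite | github.com/namhyeonh0/Algorithm | 프로그래머스/unrated/133499. 옹알이 （2）/옹알이 （2）.py | solution
-- ===== SOURCE A (Python) =====
-- def solution(babbling):
--     baby = ["aya", "ye", "woo", "ma"]
--     answer = 0
--     for i in babbling:
--         word = ''
--         l = []
--         for j in i:
--             word += j
--             if word in baby:
--                 l.append(word)
--                 word = ''
--                 if len(l) >= 2 and l[-1] == l[-2]:
--                     break
--         else:
--             if len(word) == 0:
--                 answer += 1
--     return answer
-- ===== SOURCE B (Python) =====
-- def solution(babbling):
--     answer = 0
--     for s in babbling: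
--         # phase 1: greedy tokenization
--         parts = []
--         rest = s
--         while True:
--             if rest.startswith("aya"):
--                 parts.append("aya")
--                 rest = rest[3:]
--             elif rest.startswith("ye"):
--                 parts.append("ye")
--                 rest = rest[2:]
--             elif rest.startswith("woo"):
--                 parts.append("woo")
--                 rest = rest[3:]
--             elif rest.startswith("ma"):
--                 parts.append("ma")
--                 rest = rest[2:]
--             else:
--                 break
--         # phase 2: validation (full coverage, no equal adjacent tokens)
--         if rest == "" and all(x != y for x, y in zip(parts, parts[1:])):
--             answer += 1
--     return answer
-- ===== Notes on version B (the rewrite author's own statement) =====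
-- stated objective: idiomatic
-- what changed: Replaces A's interleaved char-by-char scan (growing word buffer, membership test, early break on duplicate) by a two-phase per-string pass: greedy prefix tokenization first, then a separate validation of full coverage and no equal adjacent tokens.
import Mathlib
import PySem

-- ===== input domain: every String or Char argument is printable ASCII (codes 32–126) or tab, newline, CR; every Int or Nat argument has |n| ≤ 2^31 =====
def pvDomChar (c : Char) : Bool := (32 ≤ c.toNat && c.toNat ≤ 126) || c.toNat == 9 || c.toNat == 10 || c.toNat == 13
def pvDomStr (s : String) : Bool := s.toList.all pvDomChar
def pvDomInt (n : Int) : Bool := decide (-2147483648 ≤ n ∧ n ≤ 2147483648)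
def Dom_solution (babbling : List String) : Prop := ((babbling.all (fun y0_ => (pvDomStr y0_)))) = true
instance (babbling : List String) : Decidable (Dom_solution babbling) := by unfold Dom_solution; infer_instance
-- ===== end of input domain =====

-- B restructures A's interleaved greedy scan into two per-string phases (tokenize, then validate); same return value.

-- ===== PORT A =====
-- baby = ["aya", "ye", "woo", "ma"] (as lists of chars; the ports work on s.toList)
def babyA : List (List Char) := [['a','y','a'], ['y','e'], ['w','o','o'], ['m','a']]

-- the inner 'for j in i' loop of A; state (word, l); returns (word, l, broke)
def loopA : List Char → List Char → List (List Char) → (List Char × List (List Char) × Bool)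
  | [], word, l => (word, l, false)
  | c :: cs, word, l =>
    if word ++ [c] ∈ babyA then
      -- 'if len(l) >= 2 and l[-1] == l[-2]: break'  (word was just reset to '')
      if 2 ≤ (l ++ [word ++ [c]]).length ∧
          PySem.List.pyGet? (l ++ [word ++ [c]]) (-1) = PySem.List.pyGet? (l ++ [word ++ [c]]) (-2) then
        ([], l ++ [word ++ [c]], true)
      else loopA cs [] (l ++ [word ++ [c]])
    else loopA cs (word ++ [c]) l

def solution (babbling : List String) : Int :=
  babbling.foldl (fun answer i =>
    let r := loopA i.toList [] []
    -- for-else: the else block runs only when the loop did not break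
    if r.2.2 = false then (if r.1.length = 0 then answer + 1 else answer) else answer) 0

-- ===== PORT B =====
-- phase 1 of Source B: the while-loop stripping a matching token prefix ('startswith' = take, slice = drop); returns (parts, rest)
def tokB (cs : List Char) : List (List Char) × List Char :=
  if cs.take 3 = ['a','y','a'] then
    (['a','y','a'] :: (tokB (cs.drop 3)).1, (tokB (cs.drop 3)).2)
  else if cs.take 2 = ['y','e'] then
    (['y','e'] :: (tokB (cs.drop 2)).1, (tokB (cs.drop 2)).2)
  else if cs.take 3 = ['w','o','o'] then
    (['w','o','o'] :: (tokB (cs.drop 3)).1, (tokB (cs.drop 3)).2)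
  else if cs.take 2 = ['m','a'] then
    (['m','a'] :: (tokB (cs.drop 2)).1, (tokB (cs.drop 2)).2)
  else ([], cs)
termination_by cs.length
decreasing_by
  · have := congrArg List.length ‹cs.take 3 = _›
    simp [List.length_take] at this ⊢; omega
  · have := congrArg List.length ‹cs.take 2 = _›
    simp [List.length_take] at this ⊢; omega
  · have := congrArg List.length ‹cs.take 3 = _›
    simp [List.length_take] at this ⊢; omega
  · have := congrArg List.length ‹cs.take 2 = _›
    simp [List.length_take] at this ⊢; omega

-- phase 2 of Source B: all(x != y for x, y in zip(parts, parts[1:]))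
def noAdjB (parts : List (List Char)) : Bool :=
  (parts.zip parts.tail).all fun p => p.1 ≠ p.2

def solution_alt (babbling : List String) : Int :=
  babbling.foldl (fun answer s =>
    let r := tokB s.toList
    if r.2 = [] ∧ noAdjB r.1 then answer + 1 else answer) 0

-- ===== PRECONDITION & SPEC =====
def Spec_solution (babbling : List String) (out : Int) : Prop := out = solution_alt babbling
instance (babbling : List String) (out : Int) : Decidable (Spec_solution babbling out) := by unfold Spec_solution; infer_instance

-- ===== CLAIM (what is proved, stated in full; the proofs are below) =====
def Claim_equal_solution : Prop := ∀ (babbling : List String), Dom_solution babbling → Spec_solution babbling (solution babbling)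

-- ===== LEMMAS AND PROOFS =====

-- the adjacency check threaded with the previous token (none at the start)
def chainFrom (last? : Option (List Char)) : List (List Char) → Bool
  | [] => true
  | p :: ps => (decide (last? ≠ some p)) && chainFrom (some p) ps

theorem chainFrom_some (ps : List (List Char)) : ∀ p,
    chainFrom (some p) ps = (((p :: ps).zip ps).all fun x => x.1 ≠ x.2) := by
  induction ps with
  | nil => intro p; simp [chainFrom]
  | cons q qs ih => intro p; simp [chainFrom, ih q, List.zip]

theorem chainFrom_eq_noAdj (parts : List (List Char)) :
    chainFrom none parts = noAdjB parts := by
  cases parts with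
  | nil => simp [chainFrom, noAdjB]
  | cons p ps => simp [chainFrom, chainFrom_some, noAdjB]

-- if no prefix of the remaining input extends word into baby, the scan just accumulates
theorem loopA_no_match (cs : List Char) :
    ∀ w l, (∀ n, 1 ≤ n → w ++ cs.take n ∉ babyA) →
    loopA cs w l = (w ++ cs, l, false) := by
  induction cs with
  | nil => intro w l _; simp [loopA]
  | cons c cs ih =>
    intro w l h
    have h1 : w ++ [c] ∉ babyA := by
      have := h 1 (by omega); simpa using this
    rw [loopA, if_neg h1, ih (w ++ [c]) l (fun n hn => by
      simpa [List.append_assoc] using h (n + 1) (by omega))]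
    simp

-- tokB failing to strip means no take of cs lands in baby
theorem take_not_mem (cs : List Char)
    (h1 : ¬ cs.take 3 = ['a','y','a']) (h2 : ¬ cs.take 2 = ['y','e'])
    (h3 : ¬ cs.take 3 = ['w','o','o']) (h4 : ¬ cs.take 2 = ['m','a']) :
    ∀ n, 1 ≤ n → ([] : List Char) ++ cs.take n ∉ babyA := by
  intro n _ hmem
  simp only [List.nil_append, babyA, List.mem_cons, List.not_mem_nil, or_false] at hmem
  rcases hmem with h | h | h | h
  · apply h1
    have hl := congrArg List.length h; simp [List.length_take] at hl
    have : cs.take 3 = (cs.take n).take 3 := by rw [List.take_take]; congr 1; omega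
    rw [this, h]; rfl
  · apply h2
    have hl := congrArg List.length h; simp [List.length_take] at hl
    have : cs.take 2 = (cs.take n).take 2 := by rw [List.take_take]; congr 1; omega
    rw [this, h]; rfl
  · apply h3
    have hl := congrArg List.length h; simp [List.length_take] at hl
    have : cs.take 3 = (cs.take n).take 3 := by rw [List.take_take]; congr 1; omega
    rw [this, h]; rfl
  · apply h4
    have hl := congrArg List.length h; simp [List.length_take] at hl
    have : cs.take 2 = (cs.take n).take 2 := by rw [List.take_take]; congr 1; omega
    rw [this, h]; rfl

theorem pyGet_neg2_append (l : List (List Char)) (t : List Char) (h : l ≠ []) :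
    PySem.List.pyGet? (l ++ [t]) (-2) = l.getLast? := by
  have hl : 1 ≤ l.length := List.length_pos_iff.mpr h
  rw [PySem.List.pyGet?_neg_ofNat (l ++ [t]) 2 (by omega) (by simp; omega)]
  have he : (l ++ [t]).length - 2 = l.length - 1 := by simp
  rw [he, List.getElem?_append_left (by omega), List.getLast?_eq_getElem?]

-- the break test of A is exactly "last token repeats"
theorem breakCond (l : List (List Char)) (t : List Char) :
    (2 ≤ (l ++ [t]).length ∧
      PySem.List.pyGet? (l ++ [t]) (-1) = PySem.List.pyGet? (l ++ [t]) (-2)) ↔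
    l.getLast? = some t := by
  by_cases hl : l = []
  · subst hl
    simp [PySem.List.pyGet?, PySem.List.pyIdx?]
  · rw [PySem.List.pyGet?_neg_one_append_singleton, pyGet_neg2_append l t hl]
    have : 1 ≤ l.length := List.length_pos_iff.mpr hl
    simp only [List.length_append, List.length_cons, List.length_nil]
    constructor
    · rintro ⟨-, h⟩; exact h.symm
    · intro h; exact ⟨by omega, h.symm⟩

theorem step_aya (rest : List Char) (l : List (List Char)) :
    loopA ('a' :: 'y' :: 'a' :: rest) [] l =
      if l.getLast? = some ['a','y','a'] then ([], l ++ [['a','y','a']], true)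
      else loopA rest [] (l ++ [['a','y','a']]) := by
  rw [loopA, if_neg (by decide), loopA, if_neg (by decide), loopA, if_pos (by decide)]
  simp only [List.nil_append, List.cons_append]
  rw [if_congr (breakCond l ['a','y','a']) rfl rfl]

theorem step_ye (rest : List Char) (l : List (List Char)) :
    loopA ('y' :: 'e' :: rest) [] l =
      if l.getLast? = some ['y','e'] then ([], l ++ [['y','e']], true)
      else loopA rest [] (l ++ [['y','e']]) := by
  rw [loopA, if_neg (by decide), loopA, if_pos (by decide)]
  simp only [List.nil_append, List.cons_append]
  rw [if_congr (breakCond l ['y','e']) rfl rfl]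

theorem step_woo (rest : List Char) (l : List (List Char)) :
    loopA ('w' :: 'o' :: 'o' :: rest) [] l =
      if l.getLast? = some ['w','o','o'] then ([], l ++ [['w','o','o']], true)
      else loopA rest [] (l ++ [['w','o','o']]) := by
  rw [loopA, if_neg (by decide), loopA, if_neg (by decide), loopA, if_pos (by decide)]
  simp only [List.nil_append, List.cons_append]
  rw [if_congr (breakCond l ['w','o','o']) rfl rfl]

theorem step_ma (rest : List Char) (l : List (List Char)) :
    loopA ('m' :: 'a' :: rest) [] l =
      if l.getLast? = some ['m','a'] then ([], l ++ [['m','a']], true)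
      else loopA rest [] (l ++ [['m','a']]) := by
  rw [loopA, if_neg (by decide), loopA, if_pos (by decide)]
  simp only [List.nil_append, List.cons_append]
  rw [if_congr (breakCond l ['m','a']) rfl rfl]

theorem eq_cons_of_take {cs : List Char} {t : List Char} (h : cs.take t.length = t) :
    cs = t ++ cs.drop t.length := by
  conv_lhs => rw [← List.take_append_drop t.length cs, h]

theorem loopA_verdict_aux : ∀ (fuel : Nat) (cs : List Char), cs.length ≤ fuel →
    ∀ l, ((loopA cs [] l).2.2 = false ∧ (loopA cs [] l).1 = []) ↔
      ((tokB cs).2 = [] ∧ chainFrom l.getLast? (tokB cs).1 = true) := by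
  intro fuel
  induction fuel with
  | zero =>
    intro cs hcs l
    have : cs = [] := List.eq_nil_of_length_eq_zero (by omega)
    subst this
    rw [tokB]
    simp [loopA, chainFrom]
  | succ n ih =>
    intro cs hcs l
    rw [tokB]
    by_cases h1 : cs.take 3 = ['a','y','a']
    · rw [if_pos h1]
      have hcs3 : cs = 'a' :: 'y' :: 'a' :: cs.drop 3 := eq_cons_of_take (t := ['a','y','a']) h1
      have hlen : (cs.drop 3).length ≤ n := by
        have := congrArg List.length hcs3
        simp [List.length_drop] at this ⊢; omega
      conv_lhs => rw [hcs3, step_aya]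
      by_cases hbr : l.getLast? = some ['a','y','a']
      · rw [if_pos hbr]; simp [chainFrom, hbr]
      · rw [if_neg hbr, ih (cs.drop 3) hlen (l ++ [['a','y','a']])]
        simp [chainFrom, hbr]
    · rw [if_neg h1]
      by_cases h2 : cs.take 2 = ['y','e']
      · rw [if_pos h2]
        have hcs2 : cs = 'y' :: 'e' :: cs.drop 2 := eq_cons_of_take (t := ['y','e']) h2
        have hlen : (cs.drop 2).length ≤ n := by
          have := congrArg List.length hcs2
          simp [List.length_drop] at this ⊢; omega
        conv_lhs => rw [hcs2, step_ye]
        by_cases hbr : l.getLast? = some ['y','e']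
        · rw [if_pos hbr]; simp [chainFrom, hbr]
        · rw [if_neg hbr, ih (cs.drop 2) hlen (l ++ [['y','e']])]
          simp [chainFrom, hbr]
      · rw [if_neg h2]
        by_cases h3 : cs.take 3 = ['w','o','o']
        · rw [if_pos h3]
          have hcs3 : cs = 'w' :: 'o' :: 'o' :: cs.drop 3 := eq_cons_of_take (t := ['w','o','o']) h3
          have hlen : (cs.drop 3).length ≤ n := by
            have := congrArg List.length hcs3
            simp [List.length_drop] at this ⊢; omega
          conv_lhs => rw [hcs3, step_woo]
          by_cases hbr : l.getLast? = some ['w','o','o']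
          · rw [if_pos hbr]; simp [chainFrom, hbr]
          · rw [if_neg hbr, ih (cs.drop 3) hlen (l ++ [['w','o','o']])]
            simp [chainFrom, hbr]
        · rw [if_neg h3]
          by_cases h4 : cs.take 2 = ['m','a']
          · rw [if_pos h4]
            have hcs2 : cs = 'm' :: 'a' :: cs.drop 2 := eq_cons_of_take (t := ['m','a']) h4
            have hlen : (cs.drop 2).length ≤ n := by
              have := congrArg List.length hcs2
              simp [List.length_drop] at this ⊢; omega
            conv_lhs => rw [hcs2, step_ma]
            by_cases hbr : l.getLast? = some ['m','a']
            · rw [if_pos hbr]; simp [chainFrom, hbr]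
            · rw [if_neg hbr, ih (cs.drop 2) hlen (l ++ [['m','a']])]
              simp [chainFrom, hbr]
          · rw [if_neg h4]
            rw [loopA_no_match cs [] l (take_not_mem cs h1 h2 h3 h4)]
            simp [chainFrom]

theorem per_string (s : List Char) (a : Int) :
    (if (loopA s [] []).2.2 = false then
        (if (loopA s [] []).1.length = 0 then a + 1 else a) else a) =
    (if (tokB s).2 = [] ∧ noAdjB (tokB s).1 then a + 1 else a) := by
  have h := loopA_verdict_aux s.length s le_rfl []
  rw [List.getLast?_nil, chainFrom_eq_noAdj] at h
  by_cases hv : (tokB s).2 = [] ∧ noAdjB (tokB s).1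
  · obtain ⟨hb, hw⟩ := h.mpr ⟨hv.1, hv.2⟩
    rw [if_pos hv, if_pos hb, if_pos (by simp [hw])]
  · rw [if_neg hv]
    by_cases hb : (loopA s [] []).2.2 = false
    · rw [if_pos hb]
      have hw : ¬ (loopA s [] []).1.length = 0 := by
        intro hw
        exact hv ⟨(h.mp ⟨hb, List.eq_nil_of_length_eq_zero hw⟩).1,
                  (h.mp ⟨hb, List.eq_nil_of_length_eq_zero hw⟩).2⟩
      rw [if_neg hw]
    · rw [if_neg hb]

theorem foldl_eq (babbling : List String) : ∀ (a : Int),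
    babbling.foldl (fun answer i =>
      let r := loopA i.toList [] []
      if r.2.2 = false then (if r.1.length = 0 then answer + 1 else answer) else answer) a =
    babbling.foldl (fun answer s =>
      let r := tokB s.toList
      if r.2 = [] ∧ noAdjB r.1 then answer + 1 else answer) a := by
  induction babbling with
  | nil => intro a; rfl
  | cons s bs ih =>
    intro a
    simp only [List.foldl_cons]
    rw [per_string s.toList a]
    exact ih _

-- ===== VERDICT (by name: the statement is the Claim_ definition above) =====
theorem solution_spec : Claim_equal_solution := by
  intro babbling _
  unfold Spec_solution solution solution_alt
  exact foldl_eq babbling 0
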